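-- pv_equiv track=rewrite | github.com/antonioliverjr/Python_Dev | Udemy_CursoPython/AtividadesAulas/ExercicioSets/dig_consecutivos.py | verificaMaior
-- ===== SOURCE A (Python) =====
-- def verificaMaior(lista):
--     tam = 0
--     retorno = []
--     for valor in lista:
--         if len(valor) > tam:
--             tam = len(valor)
--             retorno = [x for x in valor]
--     return retorno
-- ===== SOURCE B (Python) =====
-- def verificaMaior(lista):
--     if not lista:
--         return []
--     ordenada = sorted(lista, key=len, reverse=True)
--     return list(ordenada[0])
-- ===== Notes on version B (the rewrite author's own statement) =====
-- stated objective: alternative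
-- what changed: Replaces A's single-pass running-max loop (tracking the best length and rebuilding the element) with a sort-then-pick strategy: stable-sort the list by length in descending order and take the first element; stability guarantees the first longest element is chosen, exactly as A's strict '>' update does.
import Mathlib
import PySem

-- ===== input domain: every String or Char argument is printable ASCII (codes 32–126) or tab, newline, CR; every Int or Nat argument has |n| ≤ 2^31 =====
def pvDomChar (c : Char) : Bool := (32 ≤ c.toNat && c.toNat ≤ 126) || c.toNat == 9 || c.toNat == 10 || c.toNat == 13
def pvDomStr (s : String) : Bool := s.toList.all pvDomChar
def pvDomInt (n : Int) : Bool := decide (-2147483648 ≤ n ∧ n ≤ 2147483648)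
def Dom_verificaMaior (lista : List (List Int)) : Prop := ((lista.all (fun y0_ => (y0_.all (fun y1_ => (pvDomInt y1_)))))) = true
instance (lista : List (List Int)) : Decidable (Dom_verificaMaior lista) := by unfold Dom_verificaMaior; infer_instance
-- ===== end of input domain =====

-- B replaces A's running-max loop by sort-then-pick: stable-sort by length descending and take the first element; alternative decomposition, return value only.


-- ===== PORT A =====
def verificaMaior (lista : List (List Int)) : List Int :=
  (lista.foldl
    (fun (s : Int × List Int) (valor : List Int) =>
      if (valor.length : Int) > s.1 then ((valor.length : Int), valor.map (fun x => x)) else s)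
    ((0 : Int), ([] : List Int))).2

-- ===== PORT B =====
-- sorted(lista, key=len, reverse=True)[0] converted by list(); the [0] index is guarded by the non-empty test
def verificaMaior_alt (lista : List (List Int)) : List Int :=
  if lista = [] then []
  else
    let ordenada := PySem.List.sorted lista (fun v => (v.length : Int)) true
    ordenada.headD []

-- ===== PRECONDITION & SPEC =====
def Spec_verificaMaior (lista : List (List Int)) (out : List Int) : Prop := out = verificaMaior_alt lista
instance (lista : List (List Int)) (out : List Int) : Decidable (Spec_verificaMaior lista out) := by unfold Spec_verificaMaior; infer_instance

-- ===== CLAIM (what is proved, stated in full; the proofs are below) =====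
def Claim_equal_verificaMaior : Prop := ∀ (lista : List (List Int)), Dom_verificaMaior lista → Spec_verificaMaior lista (verificaMaior lista)

-- ===== LEMMAS AND PROOFS =====

-- membership in insertBy
lemma mem_insertBy {α : Type} (b : α → α → Bool) (x y : α) (l : List α) :
    y ∈ PySem.List.insertBy b x l ↔ y = x ∨ y ∈ l := by
  induction l with
  | nil => simp [PySem.List.insertBy]
  | cons z zs ih =>
    simp only [PySem.List.insertBy]
    split_ifs with h
    · simp
    · simp [ih]; tauto

-- B's insertion-sort fold, with a head m dominating the accumulator, tracks A's running-max state in lockstep.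
lemma fold_insert_head (t : List (List Int)) (m : List Int) (rest : List (List Int))
    (hmax : ∀ y ∈ rest, (y.length : Int) ≤ (m.length : Int)) :
    (t.foldl (fun acc x =>
        PySem.List.insertBy (fun a b => decide (((b.length : Int)) < ((a.length : Int)))) x acc)
      (m :: rest)).headD []
    = (t.foldl
        (fun (s : Int × List Int) (valor : List Int) =>
          if (valor.length : Int) > s.1 then ((valor.length : Int), valor.map (fun x => x)) else s)
        (((m.length : Int)), m)).2 := by
  induction t generalizing m rest with
  | nil => simp
  | cons x xs ih =>
    simp only [List.foldl_cons, PySem.List.insertBy]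
    by_cases h : ((m.length : Int)) < ((x.length : Int))
    · rw [if_pos (by simpa using h), if_pos h]
      have hmax' : ∀ y ∈ m :: rest, (y.length : Int) ≤ (x.length : Int) := by
        intro y hy
        rcases List.mem_cons.mp hy with hy | hy
        · subst hy; exact le_of_lt h
        · exact le_trans (hmax y hy) (le_of_lt h)
      simpa using ih x (m :: rest) hmax'
    · rw [if_neg (by simpa using h), if_neg h]
      have hmax' : ∀ y ∈ PySem.List.insertBy
          (fun a b => decide (((b.length : Int)) < ((a.length : Int)))) x rest,
          (y.length : Int) ≤ (m.length : Int) := by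
        intro y hy
        rcases (mem_insertBy _ _ _ _).mp hy with hy | hy
        · subst hy; omega
        · exact hmax y hy
      exact ih m _ hmax'

-- ===== VERDICT (by name: the statement is the Claim_ definition above) =====
theorem verificaMaior_spec : Claim_equal_verificaMaior := by
  intro lista _
  unfold Spec_verificaMaior verificaMaior verificaMaior_alt
  cases lista with
  | nil => simp
  | cons v t =>
    simp only [reduceCtorEq, if_false, PySem.List.sorted, if_true, List.foldl_cons]
    have hins : PySem.List.insertBy
        (fun a b => decide (((b.length : Int)) < ((a.length : Int)))) v ([] : List (List Int))
        = [v] := by simp [PySem.List.insertBy]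
    rw [hins]
    have hv : (if ((v.length : Int) > (0 : Int)) then ((v.length : Int), v.map (fun x => x))
        else ((0 : Int), ([] : List Int))) = (((v.length : Int)), v) := by
      by_cases h : ((v.length : Int) > (0 : Int))
      · rw [if_pos h]; simp
      · rw [if_neg h]
        have hv0 : v = [] := List.length_eq_zero_iff.mp (by omega)
        simp [hv0]
    rw [hv]
    exact (fold_insert_head t v [] (by simp)).symm
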